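-- pv_equiv track=rewrite | github.com/vulong2505/COE-332 | homework3/app.py | mode_count
-- ===== SOURCE A (Python) =====
-- def mode_count(count_list):
--     num = 0  # The count of the certain body or head part
--     iter = 0  # The index of the part within reffHead and reffBody
--
--     for i in range(len(count_list)):
--         if num < count_list[i]:
--             num = count_list[i]
--             iter = i
--
--         # In the case of multiple modes, return error message.
--         elif num == count_list[i]:
--             iter = 0
--
--     return iter
-- ===== SOURCE B (Python) =====
-- def mode_count(count_list):
--     if not count_list:
--         return 0
--     m = max(count_list)
--     if m <= 0 or count_list.count(m) != 1:
--         return 0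
--     return count_list.index(m)
-- ===== Notes on version B (the rewrite author's own statement) =====
-- stated objective: simpler
-- what changed: Replaces A's single-pass running-max loop with tie reset by a closed form: max, uniqueness and positivity check, then first index of the max.
import Mathlib
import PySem

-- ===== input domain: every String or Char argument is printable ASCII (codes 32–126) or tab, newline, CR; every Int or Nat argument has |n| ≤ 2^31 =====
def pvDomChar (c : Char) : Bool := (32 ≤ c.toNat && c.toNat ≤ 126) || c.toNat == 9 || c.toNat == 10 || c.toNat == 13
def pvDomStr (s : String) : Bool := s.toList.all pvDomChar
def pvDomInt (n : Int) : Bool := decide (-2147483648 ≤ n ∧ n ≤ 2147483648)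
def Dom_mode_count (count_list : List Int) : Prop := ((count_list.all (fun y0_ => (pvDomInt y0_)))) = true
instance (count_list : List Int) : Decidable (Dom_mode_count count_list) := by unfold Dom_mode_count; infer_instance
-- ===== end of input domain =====

-- B replaces A's running-max loop (with tie-reset-to-0) by a closed form: max, positivity and
-- uniqueness check, then first index of the max. Objective: simpler; same O(n) cost.


-- ===== PORT A =====
-- the for-loop over range(len(count_list)) with state (num, iter); i is the current index
def modeLoopA : List Int → Nat → Int → Int → Int × Int
  | [], _, num, iter => (num, iter)
  | x :: rest, i, num, iter =>
      if num < x then modeLoopA rest (i + 1) x (Int.ofNat i)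
      else if num = x then modeLoopA rest (i + 1) num 0
      else modeLoopA rest (i + 1) num iter

def mode_count (count_list : List Int) : Int :=
  (modeLoopA count_list 0 0 0).2

-- ===== PORT B =====
def mode_count_alt (count_list : List Int) : Int :=
  match PySem.List.max? count_list (fun y => y) with
  | none => 0
  | some m =>
      if m ≤ 0 ∨ PySem.List.count count_list m ≠ 1 then 0
      else ((PySem.List.index? count_list m).getD 0 : Nat)

-- ===== PRECONDITION & SPEC =====
def Spec_mode_count (count_list : List Int) (out : Int) : Prop := out = mode_count_alt count_list
instance (count_list : List Int) (out : Int) : Decidable (Spec_mode_count count_list out) := by unfold Spec_mode_count; infer_instance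

-- ===== CLAIM (what is proved, stated in full; the proofs are below) =====
def Claim_equal_mode_count : Prop := ∀ (count_list : List Int), Dom_mode_count count_list → Spec_mode_count count_list (mode_count count_list)

-- ===== LEMMAS AND PROOFS =====

-- the effect of one loop iteration on the state, element y at index j
def stepA (y : Int) (j : Nat) (s : Int × Int) : Int × Int :=
  if s.1 < y then (y, Int.ofNat j) else if s.1 = y then (s.1, 0) else s

-- processing one more trailing element
theorem modeLoopA_snoc (xs : List Int) (y : Int) (i : Nat) (num iter : Int) :
    modeLoopA (xs ++ [y]) i num iter = stepA y (i + xs.length) (modeLoopA xs i num iter) := by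
  induction xs generalizing i num iter with
  | nil => simp [modeLoopA, stepA]
  | cons x t ih =>
      have hL : i + (x :: t).length = (i + 1) + t.length := by simp [List.length_cons]; omega
      rw [hL]
      simp only [List.cons_append, modeLoopA]
      split_ifs <;> rw [ih]

theorem foldl_max_shift (t : List Int) (a b : Int) :
    t.foldl max (max a b) = max a (t.foldl max b) := by
  induction t generalizing b with
  | nil => simp
  | cons y t ih => simp [List.foldl_cons, max_assoc, ih]

-- the closed form of A's loop state
theorem modeLoopA_closed (xs : List Int) :
    modeLoopA xs 0 0 0 =
      (xs.foldl max 0,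
       if 0 < xs.foldl max 0 ∧ xs.count (xs.foldl max 0) = 1
       then (((PySem.List.index? xs (xs.foldl max 0)).getD 0 : Nat) : Int) else 0) := by
  induction xs using List.reverseRecOn with
  | nil => simp [modeLoopA]
  | append_singleton xs y ih =>
      have hle := PySem.List.le_foldl_max xs 0
      rw [modeLoopA_snoc, ih]
      simp only [List.foldl_append, List.foldl_cons, List.foldl_nil, stepA]
      by_cases h1 : xs.foldl max 0 < y
      · -- new strict maximum: y ∉ xs
        have hy : y ∉ xs := fun hm => absurd (hle.2 y hm) (not_le.2 h1)
        have hcnt : xs.count y = 0 := List.count_eq_zero.2 hy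
        have hmax : max (xs.foldl max 0) y = y := max_eq_right (le_of_lt h1)
        have hpos : 0 < y := lt_of_le_of_lt hle.1 h1
        have hone : (xs ++ [y]).count y = 1 := by simp [List.count_append, hcnt]
        simp only [if_pos h1, hmax, if_pos (And.intro hpos hone)]
        rw [PySem.List.index?_append_singleton_self _ _ hy]
        simp
      · by_cases h2 : xs.foldl max 0 = y
        · -- tie with the running max: iter resets to 0
          have hmax : max (xs.foldl max 0) y = xs.foldl max 0 := by rw [h2, max_self]
          simp only [if_neg h1, if_pos h2, hmax]
          by_cases hpos : 0 < xs.foldl max 0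
          · have hmem : xs.foldl max 0 ∈ xs := by
              rcases PySem.List.foldl_max_mem xs 0 with h | h
              · omega
              · exact h
            have hne1 : (xs ++ [y]).count (xs.foldl max 0) ≠ 1 := by
              have h1' : 1 ≤ xs.count (xs.foldl max 0) := List.one_le_count_iff.2 hmem
              have hcy : List.count (xs.foldl max 0) [y] = 1 := by simp [h2]
              simp only [List.count_append, hcy]
              omega
            rw [if_neg (fun h => hne1 h.2)]
          · rw [if_neg (fun h => hpos h.1)]
        · -- y strictly below the running max: state unchanged
          have hmax : max (xs.foldl max 0) y = xs.foldl max 0 := max_eq_left (not_lt.1 h1)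
          have hne : y ≠ xs.foldl max 0 := fun h => h2 h.symm
          simp only [if_neg h1, if_neg h2, hmax]
          have hcnt : (xs ++ [y]).count (xs.foldl max 0) = xs.count (xs.foldl max 0) := by
            simp [List.count_append, hne]
          rw [hcnt]
          by_cases hc : 0 < xs.foldl max 0 ∧ xs.count (xs.foldl max 0) = 1
          · have hmem : xs.foldl max 0 ∈ xs := List.one_le_count_iff.1 (le_of_eq hc.2.symm)
            rw [if_pos hc, if_pos hc, PySem.List.index?_append_of_mem _ hmem]
          · rw [if_neg hc, if_neg hc]

-- ===== VERDICT (by name: the statement is the Claim_ definition above) =====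
theorem mode_count_spec : Claim_equal_mode_count := by
  intro cl _
  show mode_count cl = mode_count_alt cl
  unfold mode_count mode_count_alt
  rw [modeLoopA_closed]
  cases cl with
  | nil => simp [PySem.List.max?]
  | cons x t =>
      rw [PySem.List.max?_id_cons]
      have hshift : (x :: t).foldl max 0 = max 0 (t.foldl max x) := by
        simpa using foldl_max_shift t 0 x
      by_cases hm : t.foldl max x ≤ 0
      · have h0 : (x :: t).foldl max 0 = 0 := by rw [hshift]; omega
        simp [h0, hm]
      · rw [not_le] at hm
        have hM : (x :: t).foldl max 0 = t.foldl max x := by rw [hshift]; omega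
        rw [hM]
        dsimp only
        by_cases hc : (x :: t).count (t.foldl max x) = 1
        · rw [if_pos ⟨hm, hc⟩]
          rw [if_neg (by simp [PySem.List.count, hc]; omega)]
        · rw [if_neg (fun h => hc h.2)]
          rw [if_pos (by simp [PySem.List.count]; omega)]
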